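-- pv_equiv track=rewrite | github.com/AutSky-JadeK/Locate-and-Fill | mudoco-work/lcs_becky.py | getsns
-- ===== SOURCE A (Python) =====
-- def getsns(sen, label):
--     sns = []
--     sn = []
--     be_replaced = []
--     s_with_mask = []
--     for i in range(len(sen)):
--         if label[i] == 'O':
--             if sen[i] != '[EOS]':
--                 for j in range(len(sns)):
--                     sns[j].append(sen[i])
--                 s_with_mask.append(sen[i])
--                 sn.append(sen[i])
--         elif label[i] == 'B-INS':
--             sns.append(sn)
--             sns[-1] = sns[-1] + ['<extra_id_0>', '(', ')']
--             s_with_mask.append('[MASK_i]')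
--             if sen[i] != '[EOS]':
--                 for j in range(len(sns)):
--                     sns[j].append(sen[i])
--                 sn.append(sen[i])
--                 s_with_mask.append(sen[i])
--         elif label[i] == 'B-REP' or label[i] == 'I-REP':
--             be_replaced.append(sen[i])
--             if label[i+1] != 'I-REP':
--                 for j in range(len(sns)):
--                     sns[j] = sns[j] + be_replaced
--                 sns.append(sn)
--                 sns[-1] = sns[-1] + (['<extra_id_0>', '('] + be_replaced + [')'])
--                 sn = sn + be_replaced
--                 s_with_mask.append('[MASK_r]')
--                 be_replaced = []
--     return sns, s_with_mask
-- ===== SOURCE B (Python) =====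
-- def getsns(sen, label):
--     # Phase 1: parse labels into a flat event list ('T' kept token, 'I' insertion
--     # point with its optional token, 'R' completed replacement block).
--     events = []
--     be = []
--     for i in range(len(sen)):
--         lab, tok = label[i], sen[i]
--         if lab == 'O':
--             if tok != '[EOS]':
--                 events.append(('T', [tok]))
--         elif lab == 'B-INS':
--             events.append(('I', [tok] if tok != '[EOS]' else []))
--         elif lab == 'B-REP' or lab == 'I-REP':
--             be = be + [tok]
--             if label[i + 1] != 'I-REP':
--                 events.append(('R', be))
--                 be = []
--     # Phase 2: the shared token stream is the concatenation of all payloads.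
--     stream = [t for _, ts in events for t in ts]
--     # Phase 3: each variant is a slice of the stream around its creation offset.
--     sns, swm, off = [], [], 0
--     for kind, ts in events:
--         if kind == 'I':
--             sns.append(stream[:off] + ['<extra_id_0>', '(', ')'] + stream[off:])
--             swm.append('[MASK_i]')
--             swm += ts
--         elif kind == 'R':
--             sns.append(stream[:off] + ['<extra_id_0>', '('] + ts + [')'] + stream[off + len(ts):])
--             swm.append('[MASK_r]')
--         else:
--             swm += ts
--         off += len(ts)
--     return sns, swm
-- ===== Notes on version B (the rewrite author's own statement) =====
-- stated objective: alternative
-- what changed: Instead of A's single loop that broadcasts every token and completed replacement block onto every already-created variant list, B works in staged passes: it first parses the labels into an event list, concatenates the event payloads into one shared token stream, and then assembles each variant once as a slice of that stream around its creation offset.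
import Mathlib
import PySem

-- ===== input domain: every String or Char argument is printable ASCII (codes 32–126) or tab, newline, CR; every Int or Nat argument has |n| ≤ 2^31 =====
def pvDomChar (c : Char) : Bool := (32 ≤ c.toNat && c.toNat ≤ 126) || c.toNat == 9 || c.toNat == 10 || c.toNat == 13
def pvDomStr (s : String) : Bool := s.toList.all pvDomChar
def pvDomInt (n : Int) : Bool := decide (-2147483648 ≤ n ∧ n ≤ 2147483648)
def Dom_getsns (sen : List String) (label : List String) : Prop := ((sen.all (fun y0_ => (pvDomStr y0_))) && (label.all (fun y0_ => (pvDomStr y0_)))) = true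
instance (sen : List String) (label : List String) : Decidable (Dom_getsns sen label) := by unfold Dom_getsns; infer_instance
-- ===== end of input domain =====

-- B parses the labels once into an event list, concatenates the payloads into one shared stream,
-- and assembles each variant as a slice of that stream, instead of A's broadcasting every token
-- and replacement block onto every already-created variant list.

-- ===== PORT A =====
-- A's state: (sns, sn, be_replaced, s_with_mask)
def stepA (sen label : List String) (st : List (List String) × List String × List String × List String)
    (i : Nat) : List (List String) × List String × List String × List String :=
  let (sns, sn, be, swm) := st
  let tok := sen.getD i ""
  let lab := label.getD i ""
  if lab = "O" then
    if tok ≠ "[EOS]" then (sns.map (· ++ [tok]), sn ++ [tok], be, swm ++ [tok]) else (sns, sn, be, swm)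
  else if lab = "B-INS" then
    let sns1 := sns ++ [sn ++ ["<extra_id_0>", "(", ")"]]
    let swm1 := swm ++ ["[MASK_i]"]
    if tok ≠ "[EOS]" then (sns1.map (· ++ [tok]), sn ++ [tok], be, swm1 ++ [tok])
    else (sns1, sn, be, swm1)
  else if lab = "B-REP" ∨ lab = "I-REP" then
    let be1 := be ++ [tok]
    if label.getD (i + 1) "" ≠ "I-REP" then
      (sns.map (· ++ be1) ++ [sn ++ ["<extra_id_0>", "("] ++ be1 ++ [")"]], sn ++ be1, [], swm ++ ["[MASK_r]"])
    else (sns, sn, be1, swm)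
  else (sns, sn, be, swm)

def getsns (sen : List String) (label : List String) : List (List String) × List String :=
  let st := (List.range sen.length).foldl (stepA sen label) ([], [], [], [])
  (st.1, st.2.2.2)

-- ===== PORT B =====
-- Phase 1: parse into events ('T' kept token, 'I' insertion point, 'R' completed replacement block)
def parseEv (sen label : List String) (st : List (Char × List String) × List String)
    (i : Nat) : List (Char × List String) × List String :=
  let (evs, be) := st
  let tok := sen.getD i ""
  let lab := label.getD i ""
  if lab = "O" then
    if tok ≠ "[EOS]" then (evs ++ [('T', [tok])], be) else (evs, be)
  else if lab = "B-INS" then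
    (evs ++ [('I', if tok ≠ "[EOS]" then [tok] else [])], be)
  else if lab = "B-REP" ∨ lab = "I-REP" then
    let be1 := be ++ [tok]
    if label.getD (i + 1) "" ≠ "I-REP" then (evs ++ [('R', be1)], []) else (evs, be1)
  else (evs, be)

-- Phase 3 step: state (sns, swm, off); each variant is a slice of the shared stream
def assembleStep (stream : List String) (st : List (List String) × List String × Nat)
    (e : Char × List String) : List (List String) × List String × Nat :=
  let (sns, swm, off) := st
  let (k, ts) := e
  if k = 'I' then
    (sns ++ [stream.take off ++ ["<extra_id_0>", "(", ")"] ++ stream.drop off],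
     swm ++ ["[MASK_i]"] ++ ts, off + ts.length)
  else if k = 'R' then
    (sns ++ [stream.take off ++ ["<extra_id_0>", "("] ++ ts ++ [")"] ++ stream.drop (off + ts.length)],
     swm ++ ["[MASK_r]"], off + ts.length)
  else (sns, swm ++ ts, off + ts.length)

def getsns_alt (sen : List String) (label : List String) : List (List String) × List String :=
  let evs := ((List.range sen.length).foldl (parseEv sen label) ([], [])).1
  let stream := evs.flatMap (fun e => e.2)
  let st := evs.foldl (assembleStep stream) ([], [], 0)
  (st.1, st.2.1)

-- ===== PRECONDITION & SPEC =====
-- Pre_ excludes exactly the inputs on which the Python A raises IndexError: a label list shorter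
-- than sen, or a B-REP/I-REP label at position i with no label at i+1 (the label[i+1] lookahead).
def Pre_getsns (sen : List String) (label : List String) : Prop :=
  sen.length ≤ label.length ∧
    ∀ i < sen.length, (label.getD i "" = "B-REP" ∨ label.getD i "" = "I-REP") → i + 1 < label.length
instance (sen : List String) (label : List String) : Decidable (Pre_getsns sen label) := by
  unfold Pre_getsns; infer_instance
def pvWitness_getsns : List String × List String :=
  (["a", "x", "b", "[EOS]"], ["O", "B-REP", "B-INS", "O"])

def Spec_getsns (sen : List String) (label : List String) (out : List (List String) × List String) : Prop := out = getsns_alt sen label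
instance (sen : List String) (label : List String) (out : List (List String) × List String) : Decidable (Spec_getsns sen label out) := by unfold Spec_getsns; infer_instance

-- ===== CLAIM (what is proved, stated in full; the proofs are below) =====
def Claim_equal_getsns : Prop := ∀ (sen : List String) (label : List String), Dom_getsns sen label → Pre_getsns sen label → Spec_getsns sen label (getsns sen label)

-- ===== LEMMAS AND PROOFS =====

-- Proof-only intermediate machine M: state (stream, variants = (prefix, creation index), sn, be, swm)
def stepM (sen label : List String)
    (st : List String × List (List String × Nat) × List String × List String × List String)
    (i : Nat) : List String × List (List String × Nat) × List String × List String × List String :=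
  let (stream, vars, sn, be, swm) := st
  let tok := sen.getD i ""
  let lab := label.getD i ""
  if lab = "O" then
    if tok ≠ "[EOS]" then (stream ++ [tok], vars, sn ++ [tok], be, swm ++ [tok])
    else (stream, vars, sn, be, swm)
  else if lab = "B-INS" then
    let vars1 := vars ++ [(sn ++ ["<extra_id_0>", "(", ")"], stream.length)]
    let swm1 := swm ++ ["[MASK_i]"]
    if tok ≠ "[EOS]" then (stream ++ [tok], vars1, sn ++ [tok], be, swm1 ++ [tok])
    else (stream, vars1, sn, be, swm1)
  else if lab = "B-REP" ∨ lab = "I-REP" then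
    let be1 := be ++ [tok]
    if label.getD (i + 1) "" ≠ "I-REP" then
      let stream1 := stream ++ be1
      (stream1, vars ++ [(sn ++ ["<extra_id_0>", "("] ++ be1 ++ [")"], stream1.length)],
        sn ++ be1, [], swm ++ ["[MASK_r]"])
    else (stream, vars, sn, be1, swm)
  else (stream, vars, sn, be, swm)

-- A-state vs M-state simulation
def SimRel (a : List (List String) × List String × List String × List String)
    (b : List String × List (List String × Nat) × List String × List String × List String) : Prop :=
  a.1 = b.2.1.map (fun pk => pk.1 ++ b.1.drop pk.2) ∧
  a.2.1 = b.2.2.1 ∧ a.2.2.1 = b.2.2.2.1 ∧ a.2.2.2 = b.2.2.2.2 ∧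
  ∀ pk ∈ b.2.1, pk.2 ≤ b.1.length

theorem map_append_drop (vars : List (List String × Nat)) (stream xs : List String)
    (h : ∀ pk ∈ vars, pk.2 ≤ stream.length) :
    (vars.map (fun pk => pk.1 ++ stream.drop pk.2)).map (· ++ xs)
      = vars.map (fun pk => pk.1 ++ (stream ++ xs).drop pk.2) := by
  rw [List.map_map]
  refine List.map_congr_left (fun pk hpk => ?_)
  simp only [Function.comp_apply, List.append_assoc, List.drop_append_of_le_length (h pk hpk)]

theorem rel_step (sen label : List String) (i : Nat)
    (a : List (List String) × List String × List String × List String)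
    (b : List String × List (List String × Nat) × List String × List String × List String)
    (h : SimRel a b) :
    SimRel (stepA sen label a i) (stepM sen label b i) := by
  obtain ⟨sns, sn, be, swm⟩ := a
  obtain ⟨stream, vars, sn', be', swm'⟩ := b
  obtain ⟨h1, h2, h3, h4, h5⟩ := h
  simp only at h1 h2 h3 h4 h5
  subst h1 h2 h3 h4
  simp only [stepA, stepM]
  split_ifs with h_1 h_2 h_3 h_4 h_5 h_6
  · exact ⟨(map_append_drop vars stream [sen.getD i ""] h5).symm ▸ rfl, rfl, rfl, rfl,
      fun pk hpk => by simp only [List.length_append]; have := h5 pk hpk; omega⟩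
  · exact ⟨rfl, rfl, rfl, rfl, h5⟩
  · refine ⟨?_, rfl, rfl, rfl, ?_⟩
    · simp only [List.map_append, map_append_drop vars stream [sen.getD i ""] h5,
        List.map_cons, List.map_nil, List.drop_left]
    · intro pk hpk
      simp only [List.length_append]
      rcases List.mem_append.1 hpk with hm | hm
      · have := h5 pk hm; omega
      · rw [List.mem_singleton] at hm; subst hm; omega
  · refine ⟨?_, rfl, rfl, rfl, ?_⟩
    · simp only [List.map_append, List.map_cons, List.map_nil, List.drop_length,
        List.append_nil]
    · intro pk hpk
      rcases List.mem_append.1 hpk with hm | hm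
      · exact h5 pk hm
      · rw [List.mem_singleton] at hm; subst hm; exact le_refl _
  · refine ⟨?_, rfl, rfl, rfl, ?_⟩
    · simp only [List.map_append, map_append_drop vars stream (be ++ [sen.getD i ""]) h5,
        List.map_cons, List.map_nil, List.drop_length, List.append_nil, List.append_assoc]
    · intro pk hpk
      rcases List.mem_append.1 hpk with hm | hm
      · have := h5 pk hm; simp only [List.length_append]; omega
      · rw [List.mem_singleton] at hm; subst hm; exact le_refl _
  · exact ⟨rfl, rfl, rfl, rfl, h5⟩
  · exact ⟨rfl, rfl, rfl, rfl, h5⟩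

theorem rel_foldl (sen label : List String) (l : List Nat)
    (a : List (List String) × List String × List String × List String)
    (b : List String × List (List String × Nat) × List String × List String × List String)
    (h : SimRel a b) :
    SimRel (l.foldl (stepA sen label) a) (l.foldl (stepM sen label) b) := by
  induction l generalizing a b with
  | nil => exact h
  | cons x xs ih => exact ih _ _ (rel_step sen label x a b h)

-- pure functions of the event list
def evStream (evs : List (Char × List String)) : List String := evs.flatMap (fun e => e.2)

def swmOf : List (Char × List String) → List String
  | [] => []
  | (k, ts) :: r =>
      (if k = 'I' then "[MASK_i]" :: ts else if k = 'R' then ["[MASK_r]"] else ts) ++ swmOf r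

def mkVars : List String → List (Char × List String) → List (List String × Nat)
  | _, [] => []
  | s, (k, ts) :: r =>
      if k = 'I' then (s ++ ["<extra_id_0>", "(", ")"], s.length) :: mkVars (s ++ ts) r
      else if k = 'R' then
        (s ++ ["<extra_id_0>", "("] ++ ts ++ [")"], s.length + ts.length) :: mkVars (s ++ ts) r
      else mkVars (s ++ ts) r

-- the M-state determined by a parse state
def Fst (p : List (Char × List String) × List String) :
    List String × List (List String × Nat) × List String × List String × List String :=
  (evStream p.1, mkVars [] p.1, evStream p.1, p.2, swmOf p.1)

theorem swmOf_append (evs : List (Char × List String)) (e : Char × List String) :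
    swmOf (evs ++ [e]) = swmOf evs ++ swmOf [e] := by
  induction evs with
  | nil => simp [swmOf]
  | cons x r ih => obtain ⟨k, ts⟩ := x; simp [swmOf, ih]

theorem mkVars_append (evs : List (Char × List String)) (e : Char × List String) (s : List String) :
    mkVars s (evs ++ [e]) = mkVars s evs ++ mkVars (s ++ evStream evs) [e] := by
  induction evs generalizing s with
  | nil => simp [evStream, mkVars]
  | cons x r ih =>
      obtain ⟨k, ts⟩ := x
      simp only [List.cons_append, mkVars, ih (s ++ ts)]
      have : s ++ ts ++ evStream r = s ++ evStream ((k, ts) :: r) := by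
        simp [evStream, List.append_assoc]
      rw [this]
      split_ifs <;> simp

theorem parse_sim (sen label : List String) (i : Nat)
    (p : List (Char × List String) × List String) :
    stepM sen label (Fst p) i = Fst (parseEv sen label p i) := by
  obtain ⟨evs, be⟩ := p
  simp only [stepM, parseEv, Fst]
  split_ifs <;>
    simp_all [swmOf_append, mkVars_append, swmOf, mkVars, evStream, List.append_assoc]

theorem foldl_sim (sen label : List String) (l : List Nat)
    (p : List (Char × List String) × List String) :
    l.foldl (stepM sen label) (Fst p) = Fst (l.foldl (parseEv sen label) p) := by
  induction l generalizing p with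
  | nil => rfl
  | cons x xs ih => rw [List.foldl_cons, List.foldl_cons, parse_sim, ih]

theorem assemble_eq (evs : List (Char × List String)) (s : List String)
    (sns0 : List (List String)) (swm0 : List String) (S : List String)
    (hS : S = s ++ evStream evs) :
    evs.foldl (assembleStep S) (sns0, swm0, s.length)
      = (sns0 ++ (mkVars s evs).map (fun pk => pk.1 ++ S.drop pk.2),
         swm0 ++ swmOf evs, s.length + (evStream evs).length) := by
  induction evs generalizing s sns0 swm0 with
  | nil => simp [mkVars, swmOf, evStream]
  | cons e r ih =>
      obtain ⟨k, ts⟩ := e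
      have hS' : S = (s ++ ts) ++ evStream r := by
        simp [hS, evStream, List.append_assoc]
      have htake : S.take s.length = s := by rw [hS]; exact List.take_left
      have hdrop : S.drop s.length = ts ++ evStream r := by
        rw [hS', List.append_assoc]; exact List.drop_left
      have hdrop2 : S.drop (s.length + ts.length) = evStream r := by
        have : s.length + ts.length = (s ++ ts).length := by simp
        rw [this, hS']; exact List.drop_left
      have hlen : s.length + ts.length = (s ++ ts).length := by simp
      simp only [List.foldl_cons, assembleStep, mkVars, swmOf, evStream, List.flatMap_cons]
      split_ifs with h1 h2
      · rw [hlen, ih (s ++ ts) _ _ hS']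
        simp [htake, hdrop, List.append_assoc, evStream]
        omega
      · rw [hlen, ih (s ++ ts) _ _ hS']
        simp [htake, hdrop2, List.append_assoc, evStream]
        omega
      · rw [hlen, ih (s ++ ts) _ _ hS']
        simp [List.append_assoc, evStream]
        omega

-- ===== VERDICT (by name: the statement is the Claim_ definition above) =====
theorem getsns_spec : Claim_equal_getsns := by
  intro sen label _ _
  unfold Spec_getsns getsns getsns_alt
  have hsim := rel_foldl sen label (List.range sen.length) ([], [], [], []) (Fst ([], []))
    (by simp [SimRel, Fst, evStream, mkVars, swmOf])
  rw [foldl_sim] at hsim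
  set p := (List.range sen.length).foldl (parseEv sen label) ([], []) with hp
  obtain ⟨h1, _, _, h4, _⟩ := hsim
  have hassm := assemble_eq p.1 [] [] [] (p.1.flatMap (fun e => e.2)) (by simp [evStream])
  simp only [List.length_nil, List.nil_append] at hassm
  simp only [hassm]
  refine Prod.ext ?_ ?_
  · exact h1
  · exact h4
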